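-- pv_equiv track=rewrite | github.com/small-ansible/sansible | src/sansible/platform/proc.py | _quote_windows
-- ===== SOURCE A (Python) =====
-- def _quote_windows(arg: str) -> str:
--     """
--     Quote an argument for Windows cmd.exe.
--
--     This is more complex than Unix quoting due to cmd.exe quirks.
--     """
--     if not arg:
--         return '""'
--
--     # Check if quoting is needed
--     if not any(c in arg for c in ' \t\n\r"^&|<>()'):
--         return arg
--
--     # Escape internal quotes and wrap
--     result = []
--     num_backslashes = 0
--
--     for char in arg:
--         if char == '\\':
--             num_backslashes += 1
--         elif char == '"':
--             # Escape backslashes before quote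
--             result.extend(['\\'] * (num_backslashes * 2 + 1))
--             result.append('"')
--             num_backslashes = 0
--         else:
--             result.extend(['\\'] * num_backslashes)
--             result.append(char)
--             num_backslashes = 0
--
--     # Handle trailing backslashes
--     result.extend(['\\'] * (num_backslashes * 2))
--
--     return '"' + ''.join(result) + '"'
-- ===== SOURCE B (Python) =====
-- def _quote_windows(arg: str) -> str:
--     """
--     Quote an argument for Windows cmd.exe.
--
--     Scans run by run with lookahead: a backslash run is doubled exactly when
--     it ends at a '"' or at the end of the string.
--     """
--     if not arg:
--         return '""'
--
--     if not any(c in arg for c in ' \t\n\r"^&|<>()'):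
--         return arg
--
--     out = []
--     i = 0
--     while i < len(arg):
--         c = arg[i]
--         if c == '"':
--             out.append('\\"')
--             i += 1
--         elif c == '\\':
--             j = i
--             while j < len(arg) and arg[j] == '\\':
--                 j += 1
--             n = j - i
--             out.append('\\' * (n * 2 if (j == len(arg) or arg[j] == '"') else n))
--             i = j
--         else:
--             out.append(c)
--             i += 1
--     return '"' + ''.join(out) + '"'
-- ===== Notes on version B (the rewrite author's own statement) =====
-- stated objective: alternative
-- what changed: Replaces A's deferred backslash counter (flushed when a quote/other char/end is reached) with a run-based scan that looks ahead at each backslash run and emits it once, doubled iff the run ends at a quote or at the end of the string.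
import Mathlib
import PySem

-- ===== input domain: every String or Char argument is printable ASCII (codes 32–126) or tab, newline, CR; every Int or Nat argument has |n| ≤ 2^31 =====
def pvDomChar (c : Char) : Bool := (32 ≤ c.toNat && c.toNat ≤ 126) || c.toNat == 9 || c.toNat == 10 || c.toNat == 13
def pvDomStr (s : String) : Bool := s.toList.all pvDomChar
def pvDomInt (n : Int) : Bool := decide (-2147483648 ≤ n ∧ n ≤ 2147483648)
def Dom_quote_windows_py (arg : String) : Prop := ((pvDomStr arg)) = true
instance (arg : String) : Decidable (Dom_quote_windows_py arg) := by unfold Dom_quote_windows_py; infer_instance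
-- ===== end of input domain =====

-- B replaces A's deferred backslash counter with a run-based scan that looks ahead
-- at each backslash run (alternative decomposition, same cost).

-- ===== PORT A =====
-- "any(c in arg for c in ' \t\n\r\"^&|<>()')" (shared by both Pythons verbatim)
def quoteNeedsQuoting (cs : List Char) : Bool :=
  (" \t\n\r\"^&|<>()".toList).any (fun c => PySem.Chars.isIn [c] cs)

-- one step of A's for-loop: state = (result, num_backslashes)
def quoteStepA (st : List Char × Nat) (ch : Char) : List Char × Nat :=
  let (result, nb) := st
  if ch = '\\' then (result, nb + 1)
  else if ch = '"' then (result ++ List.replicate (nb * 2 + 1) '\\' ++ ['"'], 0)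
  else (result ++ List.replicate nb '\\' ++ [ch], 0)

def quote_windows_py (arg : String) : String :=
  if arg.toList = [] then "\"\""
  else if !(quoteNeedsQuoting arg.toList) then arg
  else
    let st := arg.toList.foldl quoteStepA ([], 0)
    let result := st.1 ++ List.replicate (st.2 * 2) '\\'
    String.mk ('"' :: result ++ ['"'])

-- ===== PORT B =====
-- Source B's while-loop over the remaining suffix; the inner "while arg[j] == '\\'"
-- run measurement is PySem-free hand code (dropWhile = exact port of that scan).
def quoteEscB : List Char → List Char
  | [] => []
  | c :: rest =>
    if c = '"' then '\\' :: '"' :: quoteEscB rest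
    else if c = '\\' then
      let rest2 := (c :: rest).dropWhile (· = '\\')
      let n := (c :: rest).length - rest2.length
      List.replicate (if rest2 = [] ∨ rest2.head? = some '"' then n * 2 else n) '\\'
        ++ quoteEscB rest2
    else c :: quoteEscB rest
  termination_by s => s.length
  decreasing_by
    · simp
    · have := List.length_dropWhile_le (fun x => decide (x = '\\')) rest
      simp_all [List.dropWhile]
    · simp

def quote_windows_py_alt (arg : String) : String :=
  if arg.toList = [] then "\"\""
  else if !(quoteNeedsQuoting arg.toList) then arg
  else String.mk ('"' :: quoteEscB arg.toList ++ ['"'])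

-- ===== PRECONDITION & SPEC =====
def Spec_quote_windows_py (arg : String) (out : String) : Prop := out = quote_windows_py_alt arg
instance (arg : String) (out : String) : Decidable (Spec_quote_windows_py arg out) := by unfold Spec_quote_windows_py; infer_instance

-- ===== CLAIM (what is proved, stated in full; the proofs are below) =====
def Claim_equal_quote_windows_py : Prop := ∀ (arg : String), Dom_quote_windows_py arg → Spec_quote_windows_py arg (quote_windows_py arg)

-- ===== LEMMAS AND PROOFS =====

-- replicate n a ++ a :: l = replicate (n+1) a ++ l
theorem quoteRepCons (n : Nat) (a : Char) (l : List Char) :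
    List.replicate n a ++ a :: l = List.replicate (n + 1) a ++ l := by
  simp [List.replicate_succ', List.append_assoc]

theorem quoteDropRep (n : Nat) (l : List Char) :
    (List.replicate n '\\' ++ l).dropWhile (· = '\\') = l.dropWhile (· = '\\') := by
  induction n with
  | zero => simp
  | succ m ih => simp [List.replicate_succ, List.dropWhile, ih]

-- tail run of backslashes: escB (replicate nb '\') = replicate (2 nb) '\'
theorem quoteEscB_rep (nb : Nat) :
    quoteEscB (List.replicate nb '\\') = List.replicate (nb * 2) '\\' := by
  cases nb with
  | zero => simp [quoteEscB]
  | succ m =>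
    rw [List.replicate_succ, quoteEscB]
    have hdrop : (('\\' : Char) :: List.replicate m '\\').dropWhile (· = '\\') = [] := by
      have := quoteDropRep (m + 1) ([] : List Char)
      simpa [List.replicate_succ] using this
    simp [hdrop, quoteEscB]

-- run before a quote: doubled and the quote escaped
theorem quoteEscB_quote (nb : Nat) (cs : List Char) :
    quoteEscB (List.replicate nb '\\' ++ '"' :: cs)
      = List.replicate (nb * 2 + 1) '\\' ++ '"' :: quoteEscB cs := by
  cases nb with
  | zero => simp [quoteEscB]
  | succ m =>
    rw [List.replicate_succ, List.cons_append, quoteEscB]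
    have hdrop : (('\\' : Char) :: (List.replicate m '\\' ++ '"' :: cs)).dropWhile (· = '\\')
        = '"' :: cs := by
      have := quoteDropRep (m + 1) ('"' :: cs)
      simpa [List.replicate_succ] using this
    simp only [hdrop]
    rw [quoteEscB]
    have hlen : (('\\' : Char) :: (List.replicate m '\\' ++ '"' :: cs)).length
        - ('"' :: cs).length = m + 1 := by simp; omega
    simp only [hlen]
    simp [← quoteRepCons]

-- run before an ordinary character: emitted as is
theorem quoteEscB_other (nb : Nat) (c : Char) (cs : List Char)
    (hq : c ≠ '"') (hb : c ≠ '\\') :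
    quoteEscB (List.replicate nb '\\' ++ c :: cs)
      = List.replicate nb '\\' ++ c :: quoteEscB cs := by
  cases nb with
  | zero => simp [quoteEscB, hq, hb]
  | succ m =>
    rw [List.replicate_succ, List.cons_append, quoteEscB]
    have hdrop : (('\\' : Char) :: (List.replicate m '\\' ++ c :: cs)).dropWhile (· = '\\')
        = c :: cs := by
      have := quoteDropRep (m + 1) (c :: cs)
      simpa [List.replicate_succ, List.dropWhile, hb] using this
    simp only [hdrop]
    have hlen : (('\\' : Char) :: (List.replicate m '\\' ++ c :: cs)).length
        - (c :: cs).length = m + 1 := by simp; omega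
    simp only [hlen]
    simp [quoteEscB, hq, hb, List.replicate_succ]

-- loop invariant: A's fold with nb pending backslashes computes r ++ escB (pending ++ rest)
theorem quoteMain (cs : List Char) : ∀ (r : List Char) (nb : Nat),
    (cs.foldl quoteStepA (r, nb)).1
        ++ List.replicate ((cs.foldl quoteStepA (r, nb)).2 * 2) '\\'
      = r ++ quoteEscB (List.replicate nb '\\' ++ cs) := by
  induction cs with
  | nil => intro r nb; simp [quoteEscB_rep]
  | cons c cs ih =>
    intro r nb
    by_cases hb : c = '\\'
    · subst hb
      simp only [List.foldl_cons, quoteStepA, reduceIte]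
      rw [ih r (nb + 1), quoteRepCons]
    · by_cases hq : c = '"'
      · subst hq
        simp only [List.foldl_cons, quoteStepA, if_neg hb, reduceIte]
        rw [ih _ 0, quoteEscB_quote]
        simp [List.append_assoc]
      · simp only [List.foldl_cons, quoteStepA, if_neg hb, if_neg hq]
        rw [ih _ 0, quoteEscB_other nb c cs hq hb]
        simp [List.append_assoc]

-- ===== VERDICT (by name: the statement is the Claim_ definition above) =====
theorem quote_windows_py_spec : Claim_equal_quote_windows_py := by
  intro arg _
  unfold Spec_quote_windows_py quote_windows_py quote_windows_py_alt
  by_cases h0 : arg.toList = []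
  · simp [h0]
  · by_cases h1 : quoteNeedsQuoting arg.toList
    · have := quoteMain arg.toList [] 0
      simp only [List.replicate_zero, List.nil_append] at this
      simp [h0, h1, this]
    · simp [h0, h1]
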